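-- pv_equiv track=rewrite | github.com/shinolife63/BlockComment | block comment.py | blockComment
-- ===== SOURCE A (Python) =====
-- from collections import deque
--
-- def chunkSplit(l, n):
--     def chunker():
--         for i in range(0, len(l), n):
--             yield l[i:i + n]
--     return [' '.join(chunk) for chunk in chunker()]
--
-- def blockComment(code,comment,justification = None, clinesize = 7):
--
--     justificationtoggle = 1                  # <---+
--     if justification == None:                #     |    justificationtoggle being zero will cause no extra
--         commentdividend = 1                  #     |    spaces to be appended to comment_append, commentdividend
--         justificationtoggle = 0              #     |    determines the kind applied if justification is
--     elif justification == 'center':          #     +--> infact desired, will default to left.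
--         commentdividend = 2                  #     |    All this is doing is setting up
--     elif justification == 'right':           #     |    for the comment appending stage.
--         commentdividend = 1                  # <---+
--
--
--     lines = code.split('\n')
--     longestlen = max([len(line) if '\t' not in line else len(line)+4*line.count('\t') for line in lines])+20
--     codecenter = int(len(lines)/2)
--
--     if '\n' not in comment:                                  # <---+    Checks if the comment already has linebreaks,
--         words = comment.split(' ')                           #     |    if not it breaks the comment into
--         commentlines = chunkSplit(words, clinesize)          #     +--> lines composed of clinesize'd words, and if
--     else:                                                    #     |    it does, simply uses the existing line breaks.
--         commentlines = comment.split('\n')                   # <---+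
--
--
--     longestcommentline = max([len(line) for line in commentlines])
--     commentcenter = int(len(commentlines)/2)
--
--     queue = deque(commentlines)
--     output = []
--
--     for index, line in enumerate(lines):                                                                                                 # <---+
--         if (index >= codecenter-commentcenter) and queue:                                                                                #     |
--             comment_append = queue.popleft()                                                                                             #     |    codecenter-commentcenter is the point where the comment should begin in order to align with the codeblock's center
--         else:                                                                                                                            #     +--> if index(the line currently being worked on) had reached that point, and the queue is not empty, comment_append is set to the next value from the queue
--             comment_append = ''                                                                                                          #     |    justificationtoggle being zero will cause no extra spaces to be appended to comment_append, commentdividend determines the kind applied if justification is infact desired, will default to left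
--         comment_append = ' '*(int((longestcommentline-len(comment_append))/commentdividend)*justificationtoggle)+comment_append          # <---+
--
--
--         if index == 0 or index == len(lines)-1:                                                          # <---+
--             output.append(line+' # <---+    '.rjust(longestlen-len(line)+1,' ')+comment_append)          #     |    Because this operates on the codeblock line
--         elif index == codecenter:                                                                        #     |    by line, the output is an array
--             output.append(line+' #     +--> '.rjust(longestlen-len(line)+1,' ')+comment_append)          #     +--> we append the modified lines to, and
--         else:                                                                                            #     |    then convert back to a multiline string
--             output.append(line+' #     |    '.rjust(longestlen-len(line)+1,' ')+comment_append)          # <---+    right before returning.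
--
--
--     return '\n'.join(output)
-- ===== SOURCE B (Python) =====
-- def blockComment(code, comment, justification=None, clinesize=7):
--     lines = code.split('\n')
--     longestlen = max(len(l) + 4 * l.count('\t') for l in lines) + 20
--     codecenter = len(lines) // 2
--
--     if '\n' in comment:
--         commentlines = comment.split('\n')
--     else:
--         words = comment.split(' ')
--         commentlines = [' '.join(words[i:i + clinesize])
--                         for i in range(0, len(words), clinesize)]
--
--     longest = max(len(l) for l in commentlines)
--     start = max(codecenter - len(commentlines) // 2, 0)
--
--     pad = {
--         None: lambda t: t,
--         'center': lambda t: ' ' * ((longest - len(t)) // 2) + t,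
--         'right': lambda t: ' ' * (longest - len(t)) + t,
--     }[justification]
--
--     comment_cols = [pad(commentlines[i - start])
--                     if 0 <= i - start < len(commentlines) else pad('')
--                     for i in range(len(lines))]
--
--     last = len(lines) - 1
--     code_cols = []
--     for i, line in enumerate(lines):
--         if i == 0 or i == last:
--             marker = ' # <---+    '
--         elif i == codecenter:
--             marker = ' #     +--> '
--         else:
--             marker = ' #     |    '
--         code_cols.append(line + ' ' * (longestlen - len(line) + 1 - len(marker)) + marker)
--
--     return '\n'.join(c + m for c, m in zip(code_cols, comment_cols))
-- ===== Notes on version B (the rewrite author's own statement) =====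
-- stated objective: alternative
-- what changed: Replaces the stateful deque/enumerate loop by pure index arithmetic: a start offset start = max(codecenter - commentcenter, 0) selects commentlines[i-start] directly, the comment column and the decorated code column are built in two independent passes and zipped, and the rjust/toggle*dividend padding arithmetic is replaced by a per-justification dispatch table of pad functions.
import Mathlib
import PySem

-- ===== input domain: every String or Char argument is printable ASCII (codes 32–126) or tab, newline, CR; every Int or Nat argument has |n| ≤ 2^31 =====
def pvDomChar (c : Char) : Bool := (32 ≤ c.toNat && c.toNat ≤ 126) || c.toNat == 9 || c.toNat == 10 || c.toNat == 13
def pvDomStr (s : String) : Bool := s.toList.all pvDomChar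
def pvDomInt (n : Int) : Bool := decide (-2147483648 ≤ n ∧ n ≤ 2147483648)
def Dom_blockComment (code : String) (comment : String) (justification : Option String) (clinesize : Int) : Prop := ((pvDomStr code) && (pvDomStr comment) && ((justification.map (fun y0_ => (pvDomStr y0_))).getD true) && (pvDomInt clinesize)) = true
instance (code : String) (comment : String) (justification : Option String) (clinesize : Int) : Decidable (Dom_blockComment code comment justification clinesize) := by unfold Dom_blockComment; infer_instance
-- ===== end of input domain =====

-- B replaces A's stateful deque loop by direct index arithmetic (comment line i-start) and builds the
-- comment column and the decorated code column in two independent passes that are zipped; alternative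
-- decomposition, same cost.

-- ===== PORT A =====
-- str.rjust(w, ' '): left-pad with spaces to width w (exact: pads max(w-len,0) spaces, never truncates)
def pvRJustA (cs : List Char) (w : Int) : List Char :=
  List.replicate (w - cs.length).toNat ' ' ++ cs

-- chunkSplit(l, n) = [' '.join(chunk) for chunk in chunker()] with chunks l[i:i+n], i in range(0,len(l),n)
def pvChunkSplitA (l : List (List Char)) (n : Int) : List (List Char) :=
  (PySem.List.pyRange 0 l.length n).map
    (fun i => PySem.Chars.join [' '] (PySem.List.slice l (some i) (some (i + n))))

-- one iteration of A's "for index, line in enumerate(lines)" loop; state = (queue, output)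
def pvStepA (threshold L dividend toggle longestlen codecenter nlines : Int)
    (st : List (List Char) × List (List Char)) (p : Int × List Char) :
    List (List Char) × List (List Char) :=
  let popped : List Char × List (List Char) :=
    if threshold ≤ p.1 then
      match st.1 with
      | [] => ([], [])                 -- "and queue" is false: comment_append = '', queue stays empty
      | q :: qs => (q, qs)             -- comment_append = queue.popleft()
    else ([], st.1)
  let ca := List.replicate ((PySem.Int.truncdiv (L - popped.1.length) dividend) * toggle).toNat ' '
              ++ popped.1              -- int(x/y) on these nonneg smalls = truncating division
  let marker : List Char :=
    if p.1 = 0 ∨ p.1 = nlines - 1 then (" # <---+    ").toList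
    else if p.1 = codecenter then (" #     +--> ").toList
    else (" #     |    ").toList
  (popped.2, st.2 ++ [p.2 ++ pvRJustA marker (longestlen - p.2.length + 1) ++ ca])

def blockComment (code : String) (comment : String) (justification : Option String) (clinesize : Int) : String :=
  -- justification values other than None/'center'/'right' leave commentdividend unbound in Python
  -- (UnboundLocalError, excluded by Pre_); the values below are only reached under Pre_
  let toggle : Int := if justification = none then 0 else 1
  let dividend : Int :=
    if justification = none then 1 else if justification = some "center" then 2 else 1
  let lines := PySem.Chars.splitOn code.toList ['\n']
  let longestlen : Int :=
    ((PySem.List.max?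
        (lines.map (fun line =>
          if PySem.Chars.isIn ['\t'] line = false then (line.length : Int)
          else (line.length : Int) + 4 * (PySem.Chars.count line ['\t'] : Int)))
        (fun x => x)).getD 0) + 20     -- lines ≠ [] always, so max? is some and getD never defaults
  let codecenter : Int := PySem.Int.truncdiv (lines.length : Int) 2
  let commentlines :=
    if PySem.Chars.isIn ['\n'] comment.toList = false then
      pvChunkSplitA ((PySem.Chars.split? comment.toList [' ']).getD []) clinesize
    else PySem.Chars.splitOn comment.toList ['\n']
  let longestcommentline : Int :=
    ((PySem.List.max? (commentlines.map (fun l => (l.length : Int))) (fun x => x)).getD 0)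
    -- commentlines ≠ [] under Pre_, so getD never defaults (Python raises on max([]))
  let commentcenter : Int := PySem.Int.truncdiv (commentlines.length : Int) 2
  let res := (PySem.List.enumerate lines 0).foldl
      (pvStepA (codecenter - commentcenter) longestcommentline dividend toggle longestlen
        codecenter (lines.length : Int))
      (commentlines, [])
  String.ofList (PySem.Chars.join ['\n'] res.2)

-- ===== PORT B =====
-- Source B's pad dispatch dict {None, 'center', 'right'} ported as its three cases (exact on those keys;
-- a missing key is a KeyError in Python, outside Pre_, and falls to the identity branch here)
def pvPadB (justification : Option String) (longest : Int) (text : List Char) : List Char :=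
  if justification = some "center" then
    List.replicate (PySem.Int.floordiv (longest - text.length) 2).toNat ' ' ++ text
  else if justification = some "right" then
    List.replicate (longest - text.length).toNat ' ' ++ text
  else text

def pvMarkerB (codecenter last i : Int) : List Char :=
  if i = 0 ∨ i = last then (" # <---+    ").toList
  else if i = codecenter then (" #     +--> ").toList
  else (" #     |    ").toList

def blockComment_alt (code : String) (comment : String) (justification : Option String) (clinesize : Int) : String :=
  let lines := PySem.Chars.splitOn code.toList ['\n']
  let longestlen : Int :=
    ((PySem.List.max?
        (lines.map (fun l => (l.length : Int) + 4 * (PySem.Chars.count l ['\t'] : Int)))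
        (fun x => x)).getD 0) + 20
  let codecenter : Int := PySem.Int.floordiv (lines.length : Int) 2
  let commentlines :=
    if PySem.Chars.isIn ['\n'] comment.toList = true then
      PySem.Chars.splitOn comment.toList ['\n']
    else
      let words := (PySem.Chars.split? comment.toList [' ']).getD []
      (PySem.List.pyRange 0 words.length clinesize).map
        (fun i => PySem.Chars.join [' '] (PySem.List.slice words (some i) (some (i + clinesize))))
  let longest : Int :=
    ((PySem.List.max? (commentlines.map (fun l => (l.length : Int))) (fun x => x)).getD 0)
  let start : Int := max (codecenter - PySem.Int.floordiv (commentlines.length : Int) 2) 0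
  let commentCols := (PySem.List.pyRange 0 (lines.length : Int) 1).map (fun i =>
      if 0 ≤ i - start ∧ i - start < (commentlines.length : Int) then
        pvPadB justification longest (PySem.List.pyGetD commentlines (i - start) [])
      else pvPadB justification longest [])
  let codeCols := (PySem.List.enumerate lines 0).map (fun p =>
      let marker := pvMarkerB codecenter ((lines.length : Int) - 1) p.1
      p.2 ++ List.replicate (longestlen - p.2.length + 1 - (marker.length : Int)).toNat ' ' ++ marker)
  String.ofList (PySem.Chars.join ['\n'] ((codeCols.zip commentCols).map (fun p => p.1 ++ p.2)))

-- ===== PRECONDITION & SPEC =====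
-- Pre_ excludes only inputs on which Python A raises: an unknown justification value leaves
-- commentdividend unbound (UnboundLocalError), and clinesize < 1 with a newline-free comment makes
-- commentlines empty (range step error / max of empty sequence).
def Pre_blockComment (code : String) (comment : String) (justification : Option String) (clinesize : Int) : Prop :=
  (justification = none ∨ justification = some "center" ∨ justification = some "right") ∧
  (PySem.Str.isIn "\n" comment = true ∨ 1 ≤ clinesize)
instance (code : String) (comment : String) (justification : Option String) (clinesize : Int) : Decidable (Pre_blockComment code comment justification clinesize) := by unfold Pre_blockComment; infer_instance

def pvWitness_blockComment : String × String × Option String × Int := ("a = 1\nb = 2", "hi there", some "center", 7)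

def Spec_blockComment (code : String) (comment : String) (justification : Option String) (clinesize : Int) (out : String) : Prop := out = blockComment_alt code comment justification clinesize
instance (code : String) (comment : String) (justification : Option String) (clinesize : Int) (out : String) : Decidable (Spec_blockComment code comment justification clinesize out) := by unfold Spec_blockComment; infer_instance

-- ===== CLAIM (what is proved, stated in full; the proofs are below) =====
def Claim_equal_blockComment : Prop := ∀ (code : String) (comment : String) (justification : Option String) (clinesize : Int), Dom_blockComment code comment justification clinesize → Pre_blockComment code comment justification clinesize → Spec_blockComment code comment justification clinesize (blockComment code comment justification clinesize)


-- ===== LEMMAS AND PROOFS =====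

-- truncating and flooring division agree on a nonneg dividend and positive divisor
lemma pv_truncdiv_eq_floordiv (a b : Int) (ha : 0 ≤ a) (hb : 0 < b) :
    PySem.Int.truncdiv a b = PySem.Int.floordiv a b := by
  rw [PySem.Int.floordiv_eq_ediv_of_pos hb]
  unfold PySem.Int.truncdiv
  exact Int.tdiv_eq_ediv_of_nonneg ha

-- a substring that does not occur is counted 0 times
lemma pv_countgo_of_not_infix (sub s : List Char) (h : ¬ sub <:+: s) :
    ∀ (fuel : Nat) (l : List Char) (acc : Nat), l <:+ s →
      PySem.Chars.count.go sub fuel l acc = acc := by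
  intro fuel
  induction fuel with
  | zero => intro l acc _; rw [PySem.Chars.count.go.eq_def]
  | succ n ih =>
    intro l acc hl
    cases l with
    | nil => rw [PySem.Chars.count.go.eq_def]
    | cons c t =>
      rw [PySem.Chars.count.go.eq_def]
      have hpre : ¬ sub.isPrefixOf (c :: t) = true := by
        intro hp
        apply h
        have hp' : sub <+: (c :: t) := by
          rwa [List.isPrefixOf_iff_prefix] at hp
        obtain ⟨u, hu⟩ := hp'
        obtain ⟨v, hv⟩ := hl
        exact ⟨v, u, by rw [← hu] at hv; simpa using hv⟩
      simp only [hpre]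
      exact ih t acc (List.IsSuffix.trans ⟨[c], rfl⟩ hl)

lemma pv_count_eq_zero (s sub : List Char) (hne : sub ≠ []) (h : PySem.Chars.isIn sub s = false) :
    PySem.Chars.count s sub = 0 := by
  have hinf : ¬ sub <:+: s := (PySem.Chars.isIn_eq_false_iff _ _).mp h
  unfold PySem.Chars.count
  rw [if_neg (by simp [List.isEmpty_iff, hne])]
  exact pv_countgo_of_not_infix sub s hinf s.length s 0 List.suffix_rfl

-- the two longest-line expressions agree line by line
lemma pv_linelen_eq (line : List Char) :
    (if PySem.Chars.isIn ['\t'] line = false then (line.length : Int)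
     else (line.length : Int) + 4 * (PySem.Chars.count line ['\t'] : Int))
    = (line.length : Int) + 4 * (PySem.Chars.count line ['\t'] : Int) := by
  by_cases h : PySem.Chars.isIn ['\t'] line = false
  · rw [if_pos h, pv_count_eq_zero line ['\t'] (by simp) h]; simp
  · rw [if_neg h]

-- A's toggle/dividend padding arithmetic equals B's pad, for any text no longer than the column
lemma pv_pad_eq (j : Option String)
    (hj : j = none ∨ j = some "center" ∨ j = some "right")
    (L : Int) (text : List Char) (hlen : (text.length : Int) ≤ L) :
    List.replicate ((PySem.Int.truncdiv (L - (text.length : Int))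
        (if j = none then 1 else if j = some "center" then 2 else 1))
        * (if j = none then 0 else 1)).toNat ' ' ++ text
      = pvPadB j L text := by
  rcases hj with h | h | h <;> subst h
  · simp [pvPadB]
  · have h2 := pv_truncdiv_eq_floordiv (L - (text.length : Int)) 2 (by omega) (by omega)
    simp [pvPadB, h2]
  · simp [pvPadB, PySem.Int.truncdiv, Int.tdiv_one]

-- every element of the comment column fits in the longest-comment-line width
lemma pv_le_longest (cl : List (List Char)) (text : List Char) (h : text ∈ cl) :
    (text.length : Int)
      ≤ (PySem.List.max? (cl.map (fun l => (l.length : Int))) (fun x => x)).getD 0 := by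
  have hmem : (text.length : Int) ∈ cl.map (fun l => (l.length : Int)) :=
    List.mem_map.mpr ⟨text, h, rfl⟩
  rcases hmax : PySem.List.max? (cl.map (fun l => (l.length : Int))) (fun x => x) with _ | m
  · exfalso
    have hnil := (PySem.List.max?_eq_none_iff _ _).mp hmax
    rw [List.map_eq_nil_iff] at hnil
    subst hnil
    simp at h
  · rw [hmax]
    simpa using PySem.List.max?_isMax hmax _ hmem

lemma pv_longest_nonneg (cl : List (List Char)) :
    0 ≤ (PySem.List.max? (cl.map (fun l => (l.length : Int))) (fun x => x)).getD 0 := by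
  rcases hmax : PySem.List.max? (cl.map (fun l => (l.length : Int))) (fun x => x) with _ | m
  · rw [hmax]; simp
  · rw [hmax]
    have := PySem.List.max?_mem hmax
    simp only [Option.getD_some]
    obtain ⟨l, _, hl⟩ := List.mem_map.mp this
    omega

-- evaluating one iteration of A's loop, in the three possible queue situations
lemma pvStepA_pop (th L d t ll cc n : Int) (q : List Char) (qs out : List (List Char))
    (i : Int) (line : List Char) (hth : th ≤ i) :
    pvStepA th L d t ll cc n (q :: qs, out) (i, line)
    = (qs, out ++ [line ++ pvRJustA (pvMarkerB cc (n - 1) i) (ll - line.length + 1)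
        ++ (List.replicate ((PySem.Int.truncdiv (L - (q.length : Int)) d) * t).toNat ' ' ++ q)]) := by
  simp [pvStepA, pvMarkerB, hth]

lemma pvStepA_pop_nil (th L d t ll cc n : Int) (out : List (List Char))
    (i : Int) (line : List Char) (hth : th ≤ i) :
    pvStepA th L d t ll cc n ([], out) (i, line)
    = (([] : List (List Char)), out ++ [line ++ pvRJustA (pvMarkerB cc (n - 1) i) (ll - line.length + 1)
        ++ (List.replicate ((PySem.Int.truncdiv (L - ((0 : Nat) : Int)) d) * t).toNat ' ' ++ [])]) := by
  simp [pvStepA, pvMarkerB, hth]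

lemma pvStepA_skip (th L d t ll cc n : Int) (queue out : List (List Char))
    (i : Int) (line : List Char) (hth : ¬ th ≤ i) :
    pvStepA th L d t ll cc n (queue, out) (i, line)
    = (queue, out ++ [line ++ pvRJustA (pvMarkerB cc (n - 1) i) (ll - line.length + 1)
        ++ (List.replicate ((PySem.Int.truncdiv (L - ((0 : Nat) : Int)) d) * t).toNat ' ' ++ [])]) := by
  simp [pvStepA, pvMarkerB, hth]

-- A's queue loop, characterised: with queue = commentlines.drop((k-s)+), the output grows by
-- exactly the line decorated with its marker and the (k-s)-th comment line (padded A-style)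
lemma pv_loopA (th L d t ll cc n : Int) (cl : List (List Char)) (s : Int) (hs : s = max th 0) :
    ∀ (ls : List (List Char)) (k : Int) (out : List (List Char)), 0 ≤ k →
    ((PySem.List.enumerate ls k).foldl (pvStepA th L d t ll cc n) (cl.drop (k - s).toNat, out)).2
    = out ++ (PySem.List.enumerate ls k).map (fun p =>
        p.2 ++ pvRJustA (pvMarkerB cc (n - 1) p.1) (ll - p.2.length + 1)
          ++ (List.replicate ((PySem.Int.truncdiv
                (L - ((if 0 ≤ p.1 - s ∧ p.1 - s < (cl.length : Int)
                       then PySem.List.pyGetD cl (p.1 - s) [] else []).length : Int)) d) * t).toNat ' '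
              ++ (if 0 ≤ p.1 - s ∧ p.1 - s < (cl.length : Int)
                  then PySem.List.pyGetD cl (p.1 - s) [] else []))) := by
  have hs0 : 0 ≤ s := by omega
  have hsth : th ≤ s := by omega
  intro ls
  induction ls with
  | nil => intro k out _; simp [PySem.List.enumerate]
  | cons x xs ih =>
    intro k out hk
    rw [PySem.List.enumerate_cons]
    simp only [List.foldl_cons, List.map_cons]
    by_cases hks : s ≤ k
    · -- the queue has started (or finished) being consumed
      have hth : th ≤ k := by omega
      by_cases hin : (k - s).toNat < cl.length
      · -- pop: the head of the dropped list is cl[k-s]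
        have hsucc : ((k + 1) - s).toNat = (k - s).toNat + 1 := by omega
        have hdrop : cl.drop (k - s).toNat = cl[(k - s).toNat] :: cl.drop ((k + 1) - s).toNat := by
          rw [List.drop_eq_getElem_cons hin, hsucc]
        have hget : cl[(k - s).toNat] = PySem.List.pyGetD cl (k - s) [] := by
          rw [PySem.List.pyGetD_of_nonneg _ _ (by omega)]
          rw [List.getD_eq_getElem _ _ hin]
        have hcond : 0 ≤ k - s ∧ k - s < (cl.length : Int) := ⟨by omega, by omega⟩
        rw [hdrop, pvStepA_pop _ _ _ _ _ _ _ _ _ _ _ _ hth, ih (k + 1) _ (by omega)]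
        rw [if_pos hcond, ← hget]
        simp
      · -- queue exhausted: both now and for every later index
        have hdrop : cl.drop (k - s).toNat = [] := by
          rw [List.drop_eq_nil_iff]; omega
        have hdrop' : cl.drop ((k + 1) - s).toNat = [] := by
          rw [List.drop_eq_nil_iff]; omega
        have hcond : ¬ (0 ≤ k - s ∧ k - s < (cl.length : Int)) := by
          intro ⟨h1, h2⟩; omega
        rw [hdrop, pvStepA_pop_nil _ _ _ _ _ _ _ _ _ _ hth]
        rw [show ([] : List (List Char)) = cl.drop ((k + 1) - s).toNat from hdrop'.symm]
        rw [ih (k + 1) _ (by omega)]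
        rw [if_neg hcond]
        simp
        omega
    · -- before the start offset: nothing is popped
      have hth : ¬ th ≤ k := by omega
      have hcond : ¬ (0 ≤ k - s ∧ k - s < (cl.length : Int)) := by
        intro ⟨h1, h2⟩; omega
      have hdrop : (k - s).toNat = ((k + 1) - s).toNat := by omega
      rw [pvStepA_skip _ _ _ _ _ _ _ _ _ _ _ hth, hdrop, ih (k + 1) _ (by omega)]
      rw [if_neg hcond]
      simp

-- int(m/2) on a nonneg length is floor division
lemma pv_truncdiv2 (m : Nat) :
    PySem.Int.truncdiv (m : Int) 2 = PySem.Int.floordiv (m : Int) 2 :=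
  pv_truncdiv_eq_floordiv _ _ (Int.natCast_nonneg m) (by norm_num)

-- zipping a map over enumerate with a map over the index range is one map over enumerate
lemma pv_zip_eq (xs : List (List Char)) (f : Int × List Char → List Char) (g : Int → List Char)
    (m : Int) (hm : m = 0 + (xs.length : Int)) :
    ((((PySem.List.enumerate xs 0).map f).zip ((PySem.List.pyRange 0 m 1).map g)).map
        (fun p => p.1 ++ p.2))
    = (PySem.List.enumerate xs 0).map (fun p => f p ++ g p.1) := by
  subst hm
  rw [← PySem.List.map_fst_enumerate, List.map_map, List.zip_map', List.map_map]
  rfl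

-- the two output lists coincide (A's fold on the left, B's zip of the two columns on the right)
lemma pv_core (j : Option String)
    (hj : j = none ∨ j = some "center" ∨ j = some "right")
    (lines cl : List (List Char)) (ll cc : Int) :
    ((PySem.List.enumerate lines 0).foldl
        (pvStepA (cc - PySem.Int.floordiv (cl.length : Int) 2)
          ((PySem.List.max? (cl.map (fun l => (l.length : Int))) (fun x => x)).getD 0)
          (if j = none then 1 else if j = some "center" then 2 else 1)
          (if j = none then 0 else 1) ll cc (lines.length : Int))
        (cl, [])).2
    = ((((PySem.List.enumerate lines 0).map (fun p =>
            p.2 ++ List.replicate (ll - p.2.length + 1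
                - ((pvMarkerB cc ((lines.length : Int) - 1) p.1).length : Int)).toNat ' '
              ++ pvMarkerB cc ((lines.length : Int) - 1) p.1)).zip
        ((PySem.List.pyRange 0 (lines.length : Int) 1).map (fun i =>
          if 0 ≤ i - max (cc - PySem.Int.floordiv (cl.length : Int) 2) 0 ∧
             i - max (cc - PySem.Int.floordiv (cl.length : Int) 2) 0 < (cl.length : Int) then
            pvPadB j ((PySem.List.max? (cl.map (fun l => (l.length : Int))) (fun x => x)).getD 0)
              (PySem.List.pyGetD cl (i - max (cc - PySem.Int.floordiv (cl.length : Int) 2) 0) [])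
          else
            pvPadB j ((PySem.List.max? (cl.map (fun l => (l.length : Int))) (fun x => x)).getD 0) []))).map
        (fun p => p.1 ++ p.2)) := by
  set th : Int := cc - PySem.Int.floordiv (cl.length : Int) 2 with hth
  set s : Int := max th 0 with hs
  set L : Int := (PySem.List.max? (cl.map (fun l => (l.length : Int))) (fun x => x)).getD 0 with hL
  have hcl : (cl, ([] : List (List Char)))
      = (cl.drop ((0 : Int) - s).toNat, ([] : List (List Char))) := by
    have h0 : ((0 : Int) - s).toNat = 0 := by omega
    rw [h0, List.drop_zero]
  rw [hcl, pv_loopA th L _ _ ll cc (lines.length : Int) cl s hs lines 0 [] (by omega)]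
  rw [pv_zip_eq _ _ _ _ (by omega)]
  rw [List.nil_append]
  apply List.map_congr_left
  intro p _
  have hpad : ∀ (text : List Char), (text.length : Int) ≤ L →
      List.replicate ((PySem.Int.truncdiv (L - (text.length : Int))
          (if j = none then 1 else if j = some "center" then 2 else 1))
          * (if j = none then 0 else 1)).toNat ' ' ++ text = pvPadB j L text :=
    fun text hlen => pv_pad_eq j hj L text hlen
  by_cases hc : 0 ≤ p.1 - s ∧ p.1 - s < (cl.length : Int)
  · have hmem : PySem.List.pyGetD cl (p.1 - s) [] ∈ cl := by
      rw [PySem.List.pyGetD_of_nonneg _ _ hc.1,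
        List.getD_eq_getElem _ _ (by omega : (p.1 - s).toNat < cl.length)]
      exact List.getElem_mem _
    rw [if_pos hc, if_pos hc, hpad _ (pv_le_longest cl _ hmem)]
    simp [pvRJustA]
  · rw [if_neg hc, if_neg hc, hpad [] (by simpa using pv_longest_nonneg cl)]
    simp [pvRJustA]

-- ===== VERDICT (by name: the statement is the Claim_ definition above) =====
theorem blockComment_spec : Claim_equal_blockComment := by
  intro code comment justification clinesize _hdom hpre
  obtain ⟨hj, _⟩ := hpre
  unfold Spec_blockComment blockComment blockComment_alt
  simp only [pv_linelen_eq, pv_truncdiv2]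
  cases hni : PySem.Chars.isIn ['\n'] comment.toList
  · simp only [Bool.false_eq_true, if_false, if_true, pvChunkSplitA]
    congr 2
    exact pv_core justification hj _ _ _ _
  · simp only [Bool.true_eq_false, if_false, if_true]
    congr 2
    exact pv_core justification hj _ _ _ _
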